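-- pv_equiv track=rewrite | github.com/ZeroVirgin/threshold-completeness | tc/augment.py | greedy_augment_to_cover
-- ===== SOURCE A (Python) =====
-- from typing import List, Set, Tuple
--
-- def build_A_set(A: List[int]) -> Set[int]:
--     """Hash set of A for O(1) membership."""
--     return set(A)
--
-- def greedy_augment_to_cover(
--     n: int,
--     A: List[int],
--     uncovered: List[int],
--     halo: List[int],
--     max_add: int | None = None,
--     start: int = 2,
-- ) -> Tuple[List[int], List[int]]:
--     """
--     Greedy augmentation:
--       - A is the current y-smooth set (list).
--       - uncovered are targets k not in A+A.
--       - halo are candidate extra elements (e.g., y' -smooth with y'>y) we are allowed to ADD.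
--       - We choose candidates that cover the most still-uncovered k (i.e., for many k, k - a in A_set).
--
--     Returns (added, remaining_uncovered).
--     """
--     A_set = build_A_set(A)
--     remaining = list(uncovered)
--     added: List[int] = []
--     if not remaining or not halo:
--         return added, remaining
--
--     # Precompute for speed: map candidate a -> indices of k it can cover
--     cover_map: List[Tuple[int, List[int]]] = []  # (a, k_list)
--     rem_set = set(remaining)
--     for a in halo:
--         hits = []
--         for k in remaining:
--             b = k - a
--             if 1 <= b <= n and b in A_set:
--                 hits.append(k)
--         if hits:
--             cover_map.append((a, hits))
--
--     # Greedy loop: pick candidate covering the most remaining k at each step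
--     # Simple O(|halo| * |uncovered|) works fine for your scales
--     picks = 0
--     while rem_set:
--         best_idx = -1
--         best_gain = 0
--         # recompute effective gains w.r.t. current rem_set
--         for i, (a, hits) in enumerate(cover_map):
--             gain = sum(1 for k in hits if k in rem_set)
--             if gain > best_gain:
--                 best_gain = gain
--                 best_idx = i
--         if best_idx == -1 or best_gain == 0:
--             break  # no candidate helps further
--
--         a, hits = cover_map[best_idx]
--         added.append(a)
--         picks += 1
--         # remove covered k from rem_set
--         for k in hits:
--             if k in rem_set:
--                 rem_set.remove(k)
--
--         # Optional stop condition
--         if max_add is not None and picks >= max_add: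
--             break
--
--     return added, sorted(rem_set)
-- ===== SOURCE B (Python) =====
-- from typing import List, Tuple
--
-- def greedy_augment_to_cover(
--     n: int,
--     A: List[int],
--     uncovered: List[int],
--     halo: List[int],
--     max_add: int | None = None,
--     start: int = 2,
-- ) -> Tuple[List[int], List[int]]:
--     """Greedy set-cover augmentation with incrementally maintained gains.
--
--     Instead of rescanning every candidate's hit list each round, we keep a
--     gain counter per candidate and a reverse map k -> covering candidates,
--     decrementing gains as targets get covered.
--     """
--     A_set = set(A)
--     if not uncovered or not halo:
--         return [], list(uncovered)
--
--     cnt: dict[int, int] = {}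
--     for k in uncovered:
--         cnt[k] = cnt.get(k, 0) + 1
--
--     cands: List[Tuple[int, List[int]]] = []   # (a, distinct ks it covers)
--     gains: List[int] = []                     # gains[i] = weight of still-uncovered ks of cands[i]
--     kmap: dict[int, List[int]] = {}           # k -> indices of candidates covering k
--     for a in halo:
--         ks = [k for k in cnt if 1 <= k - a <= n and (k - a) in A_set]
--         if ks:
--             i = len(cands)
--             cands.append((a, ks))
--             gains.append(sum(cnt[k] for k in ks))
--             for k in ks:
--                 kmap.setdefault(k, []).append(i)
--
--     added: List[int] = []
--     alive = set(cnt)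
--     picks = 0
--     while alive:
--         best_idx = -1
--         best_gain = 0
--         for i, g in enumerate(gains):
--             if g > best_gain:
--                 best_gain = g
--                 best_idx = i
--         if best_idx == -1:
--             break
--         a, ks = cands[best_idx]
--         added.append(a)
--         picks += 1
--         for k in ks:
--             if k in alive:
--                 alive.remove(k)
--                 for j in kmap[k]:
--                     gains[j] -= cnt[k]
--         if max_add is not None and picks >= max_add:
--             break
--     return added, sorted(alive)
-- ===== Notes on version B (the rewrite author's own statement) =====
-- stated objective: faster
-- what changed: B replaces A's per-round rescan of every candidate's hit list (recomputing all gains against the current uncovered set each pick) by incrementally maintained gain counters with a reverse target-to-candidate index map, decrementing affected gains once when a target is covered; the argmax then reads the maintained counters instead of rescanning hit lists.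
import Mathlib
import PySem

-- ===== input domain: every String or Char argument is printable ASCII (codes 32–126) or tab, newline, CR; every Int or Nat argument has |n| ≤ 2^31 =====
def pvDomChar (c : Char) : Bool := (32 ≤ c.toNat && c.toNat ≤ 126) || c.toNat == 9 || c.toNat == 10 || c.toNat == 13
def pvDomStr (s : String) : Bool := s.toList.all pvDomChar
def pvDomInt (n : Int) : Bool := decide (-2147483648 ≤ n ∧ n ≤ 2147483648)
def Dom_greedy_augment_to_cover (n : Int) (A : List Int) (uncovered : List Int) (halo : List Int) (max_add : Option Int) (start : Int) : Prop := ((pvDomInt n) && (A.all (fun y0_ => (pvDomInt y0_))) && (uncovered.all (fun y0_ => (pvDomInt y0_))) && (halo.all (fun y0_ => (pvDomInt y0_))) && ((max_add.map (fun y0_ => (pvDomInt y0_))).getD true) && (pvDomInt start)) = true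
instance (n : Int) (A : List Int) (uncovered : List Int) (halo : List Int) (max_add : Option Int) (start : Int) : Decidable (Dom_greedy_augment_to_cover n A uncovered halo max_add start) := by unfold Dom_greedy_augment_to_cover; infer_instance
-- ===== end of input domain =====

-- ===== PORT A =====
-- B replaces A's per-round rescan of every candidate's hit list by incrementally
-- maintained gains (reverse target->candidate map, decrement on cover); same results.

-- the membership test `1 <= k - a <= n and (k - a) in A_set` shared by both Pythons
def gaHit (n : Int) (Aset : PySem.Set Int) (a k : Int) : Bool :=
  decide (1 ≤ k - a) && decide (k - a ≤ n) && PySem.Set.contains Aset (k - a)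

-- `hits = [k for k in remaining if ...]` (A builds it with an append loop)
def gaHits (n : Int) (Aset : PySem.Set Int) (remaining : List Int) (a : Int) : List Int :=
  remaining.foldl (fun hits k => if gaHit n Aset a k then hits ++ [k] else hits) []

-- the `for a in halo: ... cover_map.append((a, hits))` loop
def gaCoverMap (n : Int) (Aset : PySem.Set Int) (remaining halo : List Int) : List (Int × List Int) :=
  halo.foldl (fun cm a =>
    let hits := gaHits n Aset remaining a
    if hits.isEmpty then cm else cm ++ [(a, hits)]) []

-- `gain = sum(1 for k in hits if k in rem_set)`
def gaGain (hits : List Int) (rem : PySem.Set Int) : Int :=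
  hits.foldl (fun g k => if PySem.Set.contains rem k then g + 1 else g) 0

-- the `for i, (a, hits) in enumerate(cover_map): ...` argmax scan (recomputes gains)
def gaBest (coverMap : List (Int × List Int)) (rem : PySem.Set Int) : Int × Int :=
  (PySem.List.enumerate coverMap).foldl
    (fun best p =>
      let gain := gaGain p.2.2 rem
      if gain > best.2 then (p.1, gain) else best)
    (-1, 0)

-- `for k in hits: if k in rem_set: rem_set.remove(k)`
def gaRemove (rem : PySem.Set Int) (hits : List Int) : PySem.Set Int :=
  hits.foldl (fun r k => if PySem.Set.contains r k then PySem.Set.discard r k else r) rem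

-- the `while rem_set:` loop; the loop makes one pick per iteration and no candidate
-- is ever picked twice, so `coverMap.length + 1` fuel is never exhausted
def gaLoop (coverMap : List (Int × List Int)) (max_add : Option Int) :
    Nat → PySem.Set Int → List Int → Int → List Int × PySem.Set Int
  | 0, rem, added, _ => (added, rem)
  | fuel + 1, rem, added, picks =>
    if rem.isEmpty then (added, rem) else
    let best := gaBest coverMap rem
    if best.1 = -1 ∨ best.2 = 0 then (added, rem) else
    let entry := (PySem.List.pyGet? coverMap best.1).getD (0, [])
    let added' := added ++ [entry.1]
    let picks' := picks + 1
    let rem' := gaRemove rem entry.2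
    if max_add.isSome ∧ picks' ≥ max_add.getD 0 then (added', rem')
    else gaLoop coverMap max_add fuel rem' added' picks'

def greedy_augment_to_cover (n : Int) (A : List Int) (uncovered : List Int) (halo : List Int) (max_add : Option Int) (start : Int) : List Int × List Int :=
  let A_set := PySem.Set.ofList A
  let remaining := uncovered
  if remaining.isEmpty || halo.isEmpty then ([], remaining) else
  let rem_set := PySem.Set.ofList remaining
  let cover_map := gaCoverMap n A_set remaining halo
  let res := gaLoop cover_map max_add (cover_map.length + 1) rem_set [] 0
  (res.1, PySem.List.sorted res.2 (fun x => x))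

-- ===== PORT B =====
-- build phase: cands (a, distinct ks covered), initial gains, reverse map k -> candidate indices
def gbBuild (n : Int) (Aset : PySem.Set Int) (cnt : PySem.Dict Int Int) (halo : List Int) :
    List (Int × List Int) × List Int × PySem.Dict Int (List Nat) :=
  halo.foldl (fun st a =>
    let ks := cnt.keys.filter (fun k => gaHit n Aset a k)
    if ks.isEmpty then st else
    let i := st.1.length
    (st.1 ++ [(a, ks)],
     st.2.1 ++ [(ks.map (fun k => cnt.getD k 0)).sum],
     ks.foldl (fun m k => m.modify k [] (fun l => l ++ [i])) st.2.2))
    ([], [], PySem.Dict.empty)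

-- `for i, g in enumerate(gains): if g > best_gain: ...` — argmax by lookup, no rescans
def gbBest (gains : List Int) : Int × Int :=
  (PySem.List.enumerate gains).foldl
    (fun best p => if p.2 > best.2 then (p.1, p.2) else best)
    (-1, 0)

-- `for k in ks: if k in alive: alive.remove(k); for j in kmap[k]: gains[j] -= cnt[k]`
def gbCover (kmap : PySem.Dict Int (List Nat)) (cnt : PySem.Dict Int Int)
    (ks : List Int) (alive : PySem.Set Int) (gains : List Int) : PySem.Set Int × List Int :=
  ks.foldl (fun st k =>
    if PySem.Set.contains st.1 k then
      (PySem.Set.discard st.1 k,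
       (kmap.getD k []).foldl (fun gs j => gs.set j (gs.getD j 0 - cnt.getD k 0)) st.2)
    else st) (alive, gains)

-- `while alive:` loop over maintained gains; same fuel bound as A's loop
def gbLoop (cands : List (Int × List Int)) (kmap : PySem.Dict Int (List Nat))
    (cnt : PySem.Dict Int Int) (max_add : Option Int) :
    Nat → PySem.Set Int → List Int → List Int → Int → List Int × PySem.Set Int
  | 0, alive, _, added, _ => (added, alive)
  | fuel + 1, alive, gains, added, picks =>
    if alive.isEmpty then (added, alive) else
    let best := gbBest gains
    if best.1 = -1 then (added, alive) else
    let entry := (PySem.List.pyGet? cands best.1).getD (0, [])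
    let added' := added ++ [entry.1]
    let picks' := picks + 1
    let st := gbCover kmap cnt entry.2 alive gains
    if max_add.isSome ∧ picks' ≥ max_add.getD 0 then (added', st.1)
    else gbLoop cands kmap cnt max_add fuel st.1 st.2 added' picks'

def greedy_augment_to_cover_alt (n : Int) (A : List Int) (uncovered : List Int) (halo : List Int) (max_add : Option Int) (start : Int) : List Int × List Int :=
  let A_set := PySem.Set.ofList A
  if uncovered.isEmpty || halo.isEmpty then ([], uncovered) else
  let cnt := uncovered.foldl (fun d k => d.insert k (d.getD k 0 + 1)) PySem.Dict.empty
  let b := gbBuild n A_set cnt halo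
  let res := gbLoop b.1 b.2.2 cnt max_add (b.1.length + 1) cnt.keys b.2.1 [] 0
  (res.1, PySem.List.sorted res.2 (fun x => x))

-- ===== PRECONDITION & SPEC =====
def Spec_greedy_augment_to_cover (n : Int) (A : List Int) (uncovered : List Int) (halo : List Int) (max_add : Option Int) (start : Int) (out : List Int × List Int) : Prop := out = greedy_augment_to_cover_alt n A uncovered halo max_add start
instance (n : Int) (A : List Int) (uncovered : List Int) (halo : List Int) (max_add : Option Int) (start : Int) (out : List Int × List Int) : Decidable (Spec_greedy_augment_to_cover n A uncovered halo max_add start out) := by unfold Spec_greedy_augment_to_cover; infer_instance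

-- ===== CLAIM (what is proved, stated in full; the proofs are below) =====
def Claim_equal_greedy_augment_to_cover : Prop := ∀ (n : Int) (A : List Int) (uncovered : List Int) (halo : List Int) (max_add : Option Int) (start : Int), Dom_greedy_augment_to_cover n A uncovered halo max_add start → Spec_greedy_augment_to_cover n A uncovered halo max_add start (greedy_augment_to_cover n A uncovered halo max_add start)

-- ===== LEMMAS AND PROOFS =====

-- spec-side views of the two candidate tables, over the same filtered halo list Fl
def pvCM (n : Int) (Aset : PySem.Set Int) (U Fl : List Int) : List (Int × List Int) :=
  Fl.map (fun a => (a, U.filter (gaHit n Aset a)))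

def pvCS (n : Int) (Aset : PySem.Set Int) (U Fl : List Int) : List (Int × List Int) :=
  Fl.map (fun a => (a, (PySem.Set.ofList U).filter (gaHit n Aset a)))

lemma pv_enum_map {α β : Type} (f : α → β) (l : List α) (s : Int) :
    PySem.List.enumerate (l.map f) s = (PySem.List.enumerate l s).map (fun p => (p.1, f p.2)) := by
  induction l generalizing s with
  | nil => simp [PySem.List.enumerate_nil]
  | cons x xs ih => simp [PySem.List.enumerate_cons, ih]

lemma pv_gain_countP (hits : List Int) (rem : PySem.Set Int) :
    gaGain hits rem = (hits.countP (fun k => PySem.Set.contains rem k) : Int) := by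
  simpa [gaGain] using PySem.List.foldl_if_add_one (fun k => PySem.Set.contains rem k) hits 0

lemma pv_gain_full (hits : List Int) (rem : PySem.Set Int)
    (h : ∀ x ∈ hits, PySem.Set.contains rem x = true) :
    gaGain hits rem = (hits.length : Int) := by
  rw [pv_gain_countP, List.countP_eq_length.2 h]

lemma pv_countP_discard (rem : PySem.Set Int) (k : Int) (hk : k ∈ rem) (hits : List Int) :
    hits.countP (fun x => PySem.Set.contains (PySem.Set.discard rem k) x) + hits.count k
      = hits.countP (fun x => PySem.Set.contains rem x) := by
  induction hits with
  | nil => simp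
  | cons x t ih =>
    rw [List.countP_cons, List.countP_cons, List.count_cons]
    by_cases hxk : x = k
    · subst hxk
      have h1 : PySem.Set.contains (PySem.Set.discard rem x) x = false := by
        rw [Bool.eq_false_iff]
        intro hcon
        have := (PySem.Set.contains_iff _ _).1 hcon
        exact ((PySem.Set.mem_discard _ _ _).1 this).2 rfl
      have h2 : PySem.Set.contains rem x = true := (PySem.Set.contains_iff _ _).2 hk
      have h3 : (x == x) = true := beq_self_eq_true x
      rw [h1, h2, h3]
      have e1 : (if (false = true) then 1 else 0) = 0 := rfl
      have e2 : (if (true = true) then 1 else 0) = 1 := rfl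
      rw [e1, e2]
      omega
    · have h1 : PySem.Set.contains (PySem.Set.discard rem k) x = PySem.Set.contains rem x := by
        by_cases hx : x ∈ rem
        · rw [(PySem.Set.contains_iff _ _).2 hx,
            (PySem.Set.contains_iff _ _).2 ((PySem.Set.mem_discard _ _ _).2 ⟨hx, hxk⟩)]
        · have hA : PySem.Set.contains (PySem.Set.discard rem k) x = false := by
            rw [Bool.eq_false_iff]
            intro hcon
            exact hx ((PySem.Set.mem_discard _ _ _).1 ((PySem.Set.contains_iff _ _).1 hcon)).1
          have hB : PySem.Set.contains rem x = false := by
            rw [Bool.eq_false_iff]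
            intro hcon
            exact hx ((PySem.Set.contains_iff _ _).1 hcon)
          rw [hA, hB]
      have hbk : (x == k) = false := by simp [hxk]
      rw [h1, hbk]
      have e1 : (if (false = true) then 1 else 0) = 0 := rfl
      rw [e1]
      omega

lemma pv_gain_discard (hits : List Int) (rem : PySem.Set Int) (k : Int) (hk : k ∈ rem) :
    gaGain hits (PySem.Set.discard rem k) = gaGain hits rem - (hits.count k : Int) := by
  rw [pv_gain_countP, pv_gain_countP, ← pv_countP_discard rem k hk hits]
  push_cast
  ring

lemma pv_remove_eq_filter (l : List Int) (rem : PySem.Set Int) :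
    gaRemove rem l = rem.filter (fun x => !(l.contains x)) := by
  induction l generalizing rem with
  | nil => simp [gaRemove]
  | cons k t ih =>
    have hstep : (if PySem.Set.contains rem k then PySem.Set.discard rem k else rem)
        = rem.filter (fun x => !(x == k)) := by
      by_cases h : PySem.Set.contains rem k = true
      · rw [if_pos h]; rfl
      · rw [if_neg h]
        have hknot : k ∉ rem := fun hm => h ((PySem.Set.contains_iff _ _).2 hm)
        refine (List.filter_eq_self.2 ?_).symm
        intro x hx
        have hne : ¬ x = k := fun he => hknot (he ▸ hx)
        simp [hne]
    show gaRemove (if PySem.Set.contains rem k then PySem.Set.discard rem k else rem) t = _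
    rw [hstep, ih, List.filter_filter]
    refine List.filter_congr ?_
    intro x _
    by_cases hxk : x = k
    · subst hxk; simp
    · have h1 : (x == k) = false := by simp [hxk]
      simp [h1]
      exact fun _ => hxk

lemma pv_decfold_length (c : Int) (idxs : List Nat) (gs : List Int) :
    (idxs.foldl (fun gs j => gs.set j (gs.getD j 0 - c)) gs).length = gs.length := by
  induction idxs generalizing gs with
  | nil => rfl
  | cons j t ih => rw [List.foldl_cons, ih, List.length_set]

lemma pv_decfold_getD (c : Int) (idxs : List Nat) (gs : List Int) (hnd : idxs.Nodup)
    (i : Nat) (hi : i < gs.length) :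
    (idxs.foldl (fun gs j => gs.set j (gs.getD j 0 - c)) gs).getD i 0
      = gs.getD i 0 - (if i ∈ idxs then c else 0) := by
  induction idxs generalizing gs with
  | nil => simp
  | cons j t ih =>
    rw [List.foldl_cons]
    have hnd' := (List.nodup_cons.1 hnd).2
    have hji := (List.nodup_cons.1 hnd).1
    rw [ih (gs.set j (gs.getD j 0 - c)) hnd' (by simpa using hi)]
    by_cases hij : i = j
    · subst hij
      have hnt : i ∉ t := hji
      rw [List.getD_eq_getElem?_getD, List.getElem?_set_self hi]
      simp [List.getD_eq_getElem?_getD, List.getElem?_eq_getElem hi, hnt]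
    · rw [List.getD_eq_getElem?_getD, List.getElem?_set_ne (fun he => hij he.symm)]
      simp [List.getD_eq_getElem?_getD, hij]

lemma pv_kmfold_getD (i : Nat) (ks : List Int) (m : PySem.Dict Int (List Nat)) (k : Int)
    (hnd : ks.Nodup) :
    (ks.foldl (fun m k => m.modify k [] (fun l => l ++ [i])) m).getD k []
      = m.getD k [] ++ (if k ∈ ks then [i] else []) := by
  induction ks generalizing m with
  | nil => simp
  | cons a t ih =>
    rw [List.foldl_cons, ih _ (List.nodup_cons.1 hnd).2]
    by_cases hka : k = a
    · subst hka
      have hnt : k ∉ t := (List.nodup_cons.1 hnd).1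
      simp [hnt]
    · simp [PySem.Dict.getD_modify, hka, List.mem_cons]

lemma pv_len_split (L : List Int) (d : Int) :
    L.length = L.count d + (L.filter (fun x => !(x == d))).length := by
  induction L with
  | nil => simp
  | cons x t ih =>
    rw [List.count_cons, List.filter_cons]
    by_cases hx : x = d
    · subst hx; simp [ih]; omega
    · have : (x == d) = false := by simp [hx]
      simp [this, ih]; omega

lemma pv_sum_counts (q : Int → Bool) (Dl : List Int) (l : List Int) (hnd : Dl.Nodup)
    (hq : ∀ k ∈ Dl, q k = true) (hcov : ∀ k ∈ l, q k = true → k ∈ Dl) :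
    (Dl.map (fun k => (l.count k : Int))).sum = ((l.filter q).length : Int) := by
  induction Dl generalizing l with
  | nil =>
    have : l.filter q = [] := List.filter_eq_nil_iff.2 (fun a ha hqa => by
      exact absurd (hcov a ha hqa) (List.not_mem_nil))
    simp [this]
  | cons d t ih =>
    have hdnt : d ∉ t := (List.nodup_cons.1 hnd).1
    have hnd' : t.Nodup := (List.nodup_cons.1 hnd).2
    have hqd : q d = true := hq d List.mem_cons_self
    have hcnt : ∀ k ∈ t, (l.count k : Int) = ((l.filter (fun x => !(x == d))).count k : Int) := by
      intro k hk
      have hkd : ¬ (k = d) := fun he => hdnt (he ▸ hk)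
      rw [List.count_filter (by simp [hkd])]
    have hsum : (t.map (fun k => (l.count k : Int))).sum
        = (t.map (fun k => ((l.filter (fun x => !(x == d))).count k : Int))).sum :=
      congrArg List.sum (List.map_congr_left hcnt)
    have hih := ih (l.filter (fun x => !(x == d))) hnd'
      (fun k hk => hq k (List.mem_cons_of_mem d hk))
      (fun k hk hqk => by
        have hkl : k ∈ l := List.mem_of_mem_filter hk
        have hkd := List.of_mem_filter hk
        simp only [Bool.not_eq_true', beq_eq_false_iff_ne, ne_eq] at hkd
        rcases List.mem_cons.1 (hcov k hkl hqk) with h | h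
        · exact absurd h hkd
        · exact h)
    have hcomm : (l.filter (fun x => !(x == d))).filter q = (l.filter q).filter (fun x => !(x == d)) := by
      rw [List.filter_filter, List.filter_filter]
      exact List.filter_congr (fun x _ => Bool.and_comm _ _)
    have hlen : (l.filter q).length = l.count d + ((l.filter (fun x => !(x == d))).filter q).length := by
      rw [hcomm, ← List.count_filter (p := q) (a := d) hqd]
      exact pv_len_split (l.filter q) d
    rw [List.map_cons, List.sum_cons, hsum, hih, hlen]
    push_cast
    ring

lemma pv_best_eq (CM : List (Int × List Int)) (rem : PySem.Set Int) :
    gaBest CM rem = gbBest (CM.map (fun e => gaGain e.2 rem)) := by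
  unfold gaBest gbBest
  rw [pv_enum_map, List.foldl_map]

lemma pv_best_inv (gs : List Int) : ∀ (s : Int) (acc : Int × Int), 0 ≤ s →
    ((acc.1 = -1 ∧ acc.2 = 0) ∨ (0 ≤ acc.1 ∧ acc.1 < s ∧ 0 < acc.2)) →
    ((((PySem.List.enumerate gs s).foldl (fun best p => if p.2 > best.2 then (p.1, p.2) else best) acc).1 = -1
        ∧ ((PySem.List.enumerate gs s).foldl (fun best p => if p.2 > best.2 then (p.1, p.2) else best) acc).2 = 0)
      ∨ (0 ≤ ((PySem.List.enumerate gs s).foldl (fun best p => if p.2 > best.2 then (p.1, p.2) else best) acc).1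
        ∧ ((PySem.List.enumerate gs s).foldl (fun best p => if p.2 > best.2 then (p.1, p.2) else best) acc).1 < s + gs.length
        ∧ 0 < ((PySem.List.enumerate gs s).foldl (fun best p => if p.2 > best.2 then (p.1, p.2) else best) acc).2)) := by
  induction gs with
  | nil =>
    intro s acc hs hacc
    rw [PySem.List.enumerate_nil, List.foldl_nil]
    rcases hacc with h | h
    · exact Or.inl h
    · exact Or.inr ⟨h.1, by simpa using h.2⟩
  | cons g t ih =>
    intro s acc hs hacc
    rw [PySem.List.enumerate_cons, List.foldl_cons]
    have hacc2 : 0 ≤ acc.2 := by rcases hacc with ⟨h1, h2⟩ | ⟨h1, h2, h3⟩ <;> omega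
    have hinv : ((if g > acc.2 then (s, g) else acc).1 = -1 ∧ (if g > acc.2 then (s, g) else acc).2 = 0)
        ∨ (0 ≤ (if g > acc.2 then (s, g) else acc).1 ∧ (if g > acc.2 then (s, g) else acc).1 < s + 1
          ∧ 0 < (if g > acc.2 then (s, g) else acc).2) := by
      by_cases hg : g > acc.2
      · rw [if_pos hg]; exact Or.inr ⟨hs, by omega, by omega⟩
      · rw [if_neg hg]
        rcases hacc with h | h
        · exact Or.inl h
        · exact Or.inr ⟨h.1, by omega, h.2.2⟩
    have := ih (s + 1) (if g > acc.2 then (s, g) else acc) (by omega) hinv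
    rcases this with h | h
    · exact Or.inl h
    · refine Or.inr ⟨h.1, ?_, h.2.2⟩
      have := h.2.1
      simp only [List.length_cons]
      push_cast at this ⊢
      omega

lemma pv_best_cases (gs : List Int) :
    ((gbBest gs).1 = -1 ∧ (gbBest gs).2 = 0)
      ∨ (0 ≤ (gbBest gs).1 ∧ (gbBest gs).1 < gs.length ∧ 0 < (gbBest gs).2) := by
  have := pv_best_inv gs 0 (-1, 0) le_rfl (Or.inl ⟨rfl, rfl⟩)
  simpa [gbBest] using this

lemma pv_hits_filter (n : Int) (Aset : PySem.Set Int) (U : List Int) (a : Int) :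
    gaHits n Aset U a = U.filter (gaHit n Aset a) := by
  simpa [gaHits] using PySem.List.foldl_append_if_eq_filter (gaHit n Aset a) U []

lemma pv_covermap_gen (n : Int) (Aset : PySem.Set Int) (U : List Int) (halo : List Int) :
    ∀ (acc : List (Int × List Int)),
    halo.foldl (fun cm a =>
        let hits := gaHits n Aset U a
        if hits.isEmpty then cm else cm ++ [(a, hits)]) acc
      = acc ++ (halo.filter (fun a => !(gaHits n Aset U a).isEmpty)).map
          (fun a => (a, gaHits n Aset U a)) := by
  induction halo with
  | nil => intro acc; simp
  | cons a t ih =>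
    intro acc
    rw [List.foldl_cons]
    by_cases h : (gaHits n Aset U a).isEmpty
    · simp only [h, List.filter_cons, Bool.not_true]
      rw [ih]
      simp
    · simp only [h, List.filter_cons, Bool.not_false]
      rw [ih]
      simp

lemma pv_isEmpty_eq (n : Int) (Aset : PySem.Set Int) (U : List Int) (a : Int) :
    (U.filter (gaHit n Aset a)).isEmpty = ((PySem.Set.ofList U).filter (gaHit n Aset a)).isEmpty := by
  rw [Bool.eq_iff_iff]
  simp only [List.isEmpty_iff, List.filter_eq_nil_iff]
  constructor
  · intro h x hx; exact h x ((PySem.Set.mem_ofList _ _).1 hx)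
  · intro h x hx; exact h x ((PySem.Set.mem_ofList _ _).2 hx)

-- the filtered halo list both tables are indexed by
def pvFl (n : Int) (Aset : PySem.Set Int) (U halo : List Int) : List Int :=
  halo.filter (fun a => !((PySem.Set.ofList U).filter (gaHit n Aset a)).isEmpty)

lemma pv_covermap_spec (n : Int) (Aset : PySem.Set Int) (U halo : List Int) :
    gaCoverMap n Aset U halo = pvCM n Aset U (pvFl n Aset U halo) := by
  unfold gaCoverMap pvCM pvFl
  rw [pv_covermap_gen]
  rw [List.nil_append]
  have hf : halo.filter (fun a => !(gaHits n Aset U a).isEmpty)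
      = halo.filter (fun a => !((PySem.Set.ofList U).filter (gaHit n Aset a)).isEmpty) := by
    refine List.filter_congr ?_
    intro a _
    rw [pv_hits_filter, pv_isEmpty_eq]
  rw [hf]
  refine List.map_congr_left ?_
  intro a _
  rw [pv_hits_filter]

lemma pv_build_fst_gen (n : Int) (Aset : PySem.Set Int) (cnt : PySem.Dict Int Int) (halo : List Int) :
    ∀ (st : List (Int × List Int) × List Int × PySem.Dict Int (List Nat)),
    (halo.foldl (fun st a =>
        let ks := cnt.keys.filter (fun k => gaHit n Aset a k)
        if ks.isEmpty then st else
        let i := st.1.length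
        (st.1 ++ [(a, ks)],
         st.2.1 ++ [(ks.map (fun k => cnt.getD k 0)).sum],
         ks.foldl (fun m k => m.modify k [] (fun l => l ++ [i])) st.2.2)) st).1
      = st.1 ++ (halo.filter (fun a => !(cnt.keys.filter (fun k => gaHit n Aset a k)).isEmpty)).map
          (fun a => (a, cnt.keys.filter (fun k => gaHit n Aset a k))) := by
  induction halo with
  | nil => intro st; simp
  | cons a t ih =>
    intro st
    rw [List.foldl_cons]
    by_cases h : (cnt.keys.filter (fun k => gaHit n Aset a k)).isEmpty
    · simp only [h, List.filter_cons, Bool.not_true]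
      rw [ih]
      simp
    · simp only [h, List.filter_cons, Bool.not_false]
      rw [ih]
      simp

lemma pv_build_gains_gen (n : Int) (Aset : PySem.Set Int) (cnt : PySem.Dict Int Int) (halo : List Int) :
    ∀ (st : List (Int × List Int) × List Int × PySem.Dict Int (List Nat)),
    (halo.foldl (fun st a =>
        let ks := cnt.keys.filter (fun k => gaHit n Aset a k)
        if ks.isEmpty then st else
        let i := st.1.length
        (st.1 ++ [(a, ks)],
         st.2.1 ++ [(ks.map (fun k => cnt.getD k 0)).sum],
         ks.foldl (fun m k => m.modify k [] (fun l => l ++ [i])) st.2.2)) st).2.1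
      = st.2.1 ++ (halo.filter (fun a => !(cnt.keys.filter (fun k => gaHit n Aset a k)).isEmpty)).map
          (fun a => (((cnt.keys.filter (fun k => gaHit n Aset a k)).map (fun k => cnt.getD k 0)).sum)) := by
  induction halo with
  | nil => intro st; simp
  | cons a t ih =>
    intro st
    rw [List.foldl_cons]
    by_cases h : (cnt.keys.filter (fun k => gaHit n Aset a k)).isEmpty
    · simp only [h, List.filter_cons, Bool.not_true]
      rw [ih]
      simp
    · simp only [h, List.filter_cons, Bool.not_false]
      rw [ih]
      simp

lemma pv_build_kmap_gen (n : Int) (Aset : PySem.Set Int) (cnt : PySem.Dict Int Int)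
    (hknd : cnt.keys.Nodup) (halo : List Int) :
    ∀ (st : List (Int × List Int) × List Int × PySem.Dict Int (List Nat)),
    (∀ k, st.2.2.getD k [] = (List.range st.1.length).filter (fun j => (st.1.getD j (0, [])).2.contains k)) →
    ∀ k,
    (halo.foldl (fun st a =>
        let ks := cnt.keys.filter (fun k => gaHit n Aset a k)
        if ks.isEmpty then st else
        let i := st.1.length
        (st.1 ++ [(a, ks)],
         st.2.1 ++ [(ks.map (fun k => cnt.getD k 0)).sum],
         ks.foldl (fun m k => m.modify k [] (fun l => l ++ [i])) st.2.2)) st).2.2.getD k []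
      = (List.range (halo.foldl (fun st a =>
          let ks := cnt.keys.filter (fun k => gaHit n Aset a k)
          if ks.isEmpty then st else
          let i := st.1.length
          (st.1 ++ [(a, ks)],
           st.2.1 ++ [(ks.map (fun k => cnt.getD k 0)).sum],
           ks.foldl (fun m k => m.modify k [] (fun l => l ++ [i])) st.2.2)) st).1.length).filter
            (fun j => ((halo.foldl (fun st a =>
              let ks := cnt.keys.filter (fun k => gaHit n Aset a k)
              if ks.isEmpty then st else
              let i := st.1.length
              (st.1 ++ [(a, ks)],
               st.2.1 ++ [(ks.map (fun k => cnt.getD k 0)).sum],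
               ks.foldl (fun m k => m.modify k [] (fun l => l ++ [i])) st.2.2)) st).1.getD j (0, [])).2.contains k) := by
  induction halo with
  | nil => intro st hst k; exact hst k
  | cons a t ih =>
    intro st hst k
    rw [List.foldl_cons]
    by_cases h : (cnt.keys.filter (fun k => gaHit n Aset a k)).isEmpty = true
    · refine ih _ ?_ k
      intro k'
      rw [if_pos h]
      exact hst k'
    · refine ih _ ?_ k
      intro k'
      rw [if_neg h]
      simp only []
      have hksnd : (cnt.keys.filter (fun k => gaHit n Aset a k)).Nodup := hknd.filter _
      rw [pv_kmfold_getD _ _ _ _ hksnd, hst k']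
      have hlen : (st.1 ++ [(a, cnt.keys.filter (fun k => gaHit n Aset a k))]).length = st.1.length + 1 := by
        simp
      rw [hlen, List.range_succ, List.filter_append]
      congr 1
      · refine List.filter_congr ?_
        intro j hj
        have hjlt : j < st.1.length := List.mem_range.1 hj
        rw [List.getD_eq_getElem?_getD, List.getD_eq_getElem?_getD, List.getElem?_append_left hjlt]
      · have hget : ((st.1 ++ [(a, cnt.keys.filter (fun k => gaHit n Aset a k))]).getD st.1.length (0, [])).2
            = cnt.keys.filter (fun k => gaHit n Aset a k) := by
          rw [List.getD_eq_getElem?_getD, List.getElem?_append_right le_rfl]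
          simp
        by_cases hmem : k' ∈ cnt.keys.filter (fun k => gaHit n Aset a k)
        · rw [if_pos hmem]
          simp only [List.filter_cons, List.filter_nil, hget]
          rw [if_pos (by simpa using hmem)]
        · rw [if_neg hmem]
          simp only [List.filter_cons, List.filter_nil, hget]
          rw [if_neg (by simpa using hmem)]

lemma pv_contains_iff_mem (l : List Int) (x : Int) : l.contains x = true ↔ x ∈ l := by
  simp

lemma pv_dec_spec (n : Int) (Aset : PySem.Set Int) (U halo : List Int) (kmap : PySem.Dict Int (List Nat))
    (hkm : ∀ k, kmap.getD k [] = (List.range (pvCS n Aset U (pvFl n Aset U halo)).length).filter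
        (fun j => ((pvCS n Aset U (pvFl n Aset U halo)).getD j (0, [])).2.contains k))
    (rem : PySem.Set Int) (k : Int) (hk : k ∈ rem) (hkU : k ∈ U) :
    ((kmap.getD k []).foldl (fun gs j => gs.set j (gs.getD j 0 - (PySem.Dict.counter U).getD k 0))
        ((pvCM n Aset U (pvFl n Aset U halo)).map (fun e => gaGain e.2 rem)))
      = (pvCM n Aset U (pvFl n Aset U halo)).map (fun e => gaGain e.2 (PySem.Set.discard rem k)) := by
  have hnd : (kmap.getD k []).Nodup := by
    rw [hkm]; exact (List.nodup_range).filter _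
  apply List.ext_getElem
  · rw [pv_decfold_length]; simp
  · intro i h1 h2
    have hiL : i < ((pvCM n Aset U (pvFl n Aset U halo)).map (fun e => gaGain e.2 rem)).length := by
      rw [pv_decfold_length] at h1; exact h1
    have hiF : i < (pvFl n Aset U halo).length := by
      simpa [pvCM] using hiL
    -- getElem via getD
    have hgetl : (((kmap.getD k []).foldl (fun gs j => gs.set j (gs.getD j 0 - (PySem.Dict.counter U).getD k 0))
        ((pvCM n Aset U (pvFl n Aset U halo)).map (fun e => gaGain e.2 rem))))[i]'h1
        = (((kmap.getD k []).foldl (fun gs j => gs.set j (gs.getD j 0 - (PySem.Dict.counter U).getD k 0))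
        ((pvCM n Aset U (pvFl n Aset U halo)).map (fun e => gaGain e.2 rem)))).getD i 0 := by
      rw [List.getD_eq_getElem?_getD, List.getElem?_eq_getElem h1]; rfl
    rw [hgetl, pv_decfold_getD _ _ _ hnd i hiL]
    have ha : ∀ (r : PySem.Set Int),
        ((pvCM n Aset U (pvFl n Aset U halo)).map (fun e => gaGain e.2 r)).getD i 0
          = gaGain (U.filter (gaHit n Aset ((pvFl n Aset U halo)[i]'hiF))) r := by
      intro r
      rw [List.getD_eq_getElem?_getD, List.getElem?_eq_getElem (by simpa [pvCM] using hiF)]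
      simp [pvCM]
    have hb : ((pvCM n Aset U (pvFl n Aset U halo)).map
        (fun e => gaGain e.2 (PySem.Set.discard rem k)))[i]'h2
          = gaGain (U.filter (gaHit n Aset ((pvFl n Aset U halo)[i]'hiF))) (PySem.Set.discard rem k) := by
      simp [pvCM]
    rw [ha rem, hb]
    rw [pv_gain_discard _ rem k hk]
    -- membership in kmap k ↔ the candidate covers k
    have hmemiff : i ∈ kmap.getD k [] ↔ gaHit n Aset ((pvFl n Aset U halo)[i]'hiF) k = true := by
      rw [hkm, List.mem_filter, List.mem_range]
      have hgd : ((pvCS n Aset U (pvFl n Aset U halo)).getD i (0, [])).2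
          = (PySem.Set.ofList U).filter (gaHit n Aset ((pvFl n Aset U halo)[i]'hiF)) := by
        rw [List.getD_eq_getElem?_getD, List.getElem?_eq_getElem (by simpa [pvCS] using hiF)]
        simp [pvCS]
      rw [hgd]
      constructor
      · intro ⟨_, hc⟩
        have := (pv_contains_iff_mem _ _).1 hc
        exact (List.mem_filter.1 this).2
      · intro hc
        refine ⟨by simpa [pvCS] using hiF, (pv_contains_iff_mem _ _).2 ?_⟩
        exact List.mem_filter.2 ⟨(PySem.Set.mem_ofList _ _).2 hkU, hc⟩
    by_cases hc : gaHit n Aset ((pvFl n Aset U halo)[i]'hiF) k = true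
    · rw [if_pos (hmemiff.2 hc)]
      have hcount : ((U.filter (gaHit n Aset ((pvFl n Aset U halo)[i]'hiF))).count k) = U.count k :=
        List.count_filter hc
      rw [PySem.Dict.getD_counter, hcount]
    · rw [if_neg (fun hmem => hc (hmemiff.1 hmem))]
      have hnotmem : k ∉ U.filter (gaHit n Aset ((pvFl n Aset U halo)[i]'hiF)) := by
        intro hmem
        exact hc (List.of_mem_filter hmem)
      rw [List.count_eq_zero.2 hnotmem]
      simp

lemma pv_cover_spec (n : Int) (Aset : PySem.Set Int) (U halo : List Int) (kmap : PySem.Dict Int (List Nat))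
    (hkm : ∀ k, kmap.getD k [] = (List.range (pvCS n Aset U (pvFl n Aset U halo)).length).filter
        (fun j => ((pvCS n Aset U (pvFl n Aset U halo)).getD j (0, [])).2.contains k))
    (l : List Int) :
    ∀ (rem : PySem.Set Int), (∀ x ∈ rem, x ∈ U) →
    gbCover kmap (PySem.Dict.counter U) l rem ((pvCM n Aset U (pvFl n Aset U halo)).map (fun e => gaGain e.2 rem))
      = (gaRemove rem l, (pvCM n Aset U (pvFl n Aset U halo)).map (fun e => gaGain e.2 (gaRemove rem l))) := by
  induction l with
  | nil => intro rem hsub; rfl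
  | cons k t ih =>
    intro rem hsub
    unfold gbCover gaRemove
    rw [List.foldl_cons, List.foldl_cons]
    simp only []
    by_cases h : PySem.Set.contains rem k = true
    · rw [if_pos h, if_pos h]
      have hkrem : k ∈ rem := (PySem.Set.contains_iff _ _).1 h
      have hkU : k ∈ U := hsub k hkrem
      rw [pv_dec_spec n Aset U halo kmap hkm rem k hkrem hkU]
      have hsub' : ∀ x ∈ PySem.Set.discard rem k, x ∈ U := by
        intro x hx
        exact hsub x ((PySem.Set.mem_discard _ _ _).1 hx).1
      exact ih (PySem.Set.discard rem k) hsub'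
    · rw [if_neg h, if_neg h]
      exact ih rem hsub

lemma pv_loop_eq (n : Int) (Aset : PySem.Set Int) (U halo : List Int) (kmap : PySem.Dict Int (List Nat))
    (max_add : Option Int)
    (hkm : ∀ k, kmap.getD k [] = (List.range (pvCS n Aset U (pvFl n Aset U halo)).length).filter
        (fun j => ((pvCS n Aset U (pvFl n Aset U halo)).getD j (0, [])).2.contains k)) :
    ∀ (fuel : Nat) (rem : PySem.Set Int) (added : List Int) (picks : Int),
      (∀ x ∈ rem, x ∈ U) →
      gaLoop (pvCM n Aset U (pvFl n Aset U halo)) max_add fuel rem added picks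
        = gbLoop (pvCS n Aset U (pvFl n Aset U halo)) kmap (PySem.Dict.counter U) max_add fuel rem
            ((pvCM n Aset U (pvFl n Aset U halo)).map (fun e => gaGain e.2 rem)) added picks := by
  intro fuel
  induction fuel with
  | zero => intro rem added picks hsub; rfl
  | succ fuel ih =>
    intro rem added picks hsub
    rw [gaLoop, gbLoop]
    by_cases hre : rem.isEmpty = true
    · rw [if_pos hre, if_pos hre]
    · rw [if_neg hre, if_neg hre]
      simp only []
      rw [pv_best_eq]
      rcases pv_best_cases ((pvCM n Aset U (pvFl n Aset U halo)).map (fun e => gaGain e.2 rem))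
        with ⟨hb1, hb2⟩ | ⟨hb1, hb2, hb3⟩
      · rw [if_pos (Or.inl hb1), if_pos hb1]
      · have hne1 : ¬ ((gbBest ((pvCM n Aset U (pvFl n Aset U halo)).map (fun e => gaGain e.2 rem))).1 = -1) := by
          omega
        have hcond : ¬ ((gbBest ((pvCM n Aset U (pvFl n Aset U halo)).map (fun e => gaGain e.2 rem))).1 = -1
            ∨ (gbBest ((pvCM n Aset U (pvFl n Aset U halo)).map (fun e => gaGain e.2 rem))).2 = 0) := by
          rintro (h | h)
          · exact hne1 h
          · omega
        rw [if_neg hcond, if_neg hne1]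
        -- the selected index
        have hiF : ((gbBest ((pvCM n Aset U (pvFl n Aset U halo)).map (fun e => gaGain e.2 rem))).1).toNat
            < (pvFl n Aset U halo).length := by
          have hlen : (((pvCM n Aset U (pvFl n Aset U halo)).map (fun e => gaGain e.2 rem)).length : Int)
              = ((pvFl n Aset U halo).length : Int) := by simp [pvCM]
          rw [hlen] at hb2
          omega
        have hgetA : PySem.List.pyGet? (pvCM n Aset U (pvFl n Aset U halo))
            ((gbBest ((pvCM n Aset U (pvFl n Aset U halo)).map (fun e => gaGain e.2 rem))).1)
            = some ((pvCM n Aset U (pvFl n Aset U halo))[((gbBest ((pvCM n Aset U (pvFl n Aset U halo)).map (fun e => gaGain e.2 rem))).1).toNat]'(by simpa [pvCM] using hiF)) := by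
          rw [PySem.List.pyGet?_of_nonneg _ hb1, List.getElem?_eq_getElem (by simpa [pvCM] using hiF)]
        have hgetB : PySem.List.pyGet? (pvCS n Aset U (pvFl n Aset U halo))
            ((gbBest ((pvCM n Aset U (pvFl n Aset U halo)).map (fun e => gaGain e.2 rem))).1)
            = some ((pvCS n Aset U (pvFl n Aset U halo))[((gbBest ((pvCM n Aset U (pvFl n Aset U halo)).map (fun e => gaGain e.2 rem))).1).toNat]'(by simpa [pvCS] using hiF)) := by
          rw [PySem.List.pyGet?_of_nonneg _ hb1, List.getElem?_eq_getElem (by simpa [pvCS] using hiF)]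
        rw [hgetA, hgetB]
        have heA : (pvCM n Aset U (pvFl n Aset U halo))[((gbBest ((pvCM n Aset U (pvFl n Aset U halo)).map (fun e => gaGain e.2 rem))).1).toNat]'(by simpa [pvCM] using hiF)
            = (((pvFl n Aset U halo)[((gbBest ((pvCM n Aset U (pvFl n Aset U halo)).map (fun e => gaGain e.2 rem))).1).toNat]'hiF),
               U.filter (gaHit n Aset ((pvFl n Aset U halo)[((gbBest ((pvCM n Aset U (pvFl n Aset U halo)).map (fun e => gaGain e.2 rem))).1).toNat]'hiF))) := by
          simp [pvCM]
        have heB : (pvCS n Aset U (pvFl n Aset U halo))[((gbBest ((pvCM n Aset U (pvFl n Aset U halo)).map (fun e => gaGain e.2 rem))).1).toNat]'(by simpa [pvCS] using hiF)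
            = (((pvFl n Aset U halo)[((gbBest ((pvCM n Aset U (pvFl n Aset U halo)).map (fun e => gaGain e.2 rem))).1).toNat]'hiF),
               (PySem.Set.ofList U).filter (gaHit n Aset ((pvFl n Aset U halo)[((gbBest ((pvCM n Aset U (pvFl n Aset U halo)).map (fun e => gaGain e.2 rem))).1).toNat]'hiF))) := by
          simp [pvCS]
        rw [heA, heB]
        simp only [Option.getD_some]
        -- removal lists agree as sets
        have hrm : gaRemove rem (U.filter (gaHit n Aset ((pvFl n Aset U halo)[((gbBest ((pvCM n Aset U (pvFl n Aset U halo)).map (fun e => gaGain e.2 rem))).1).toNat]'hiF)))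
            = gaRemove rem ((PySem.Set.ofList U).filter (gaHit n Aset ((pvFl n Aset U halo)[((gbBest ((pvCM n Aset U (pvFl n Aset U halo)).map (fun e => gaGain e.2 rem))).1).toNat]'hiF))) := by
          rw [pv_remove_eq_filter, pv_remove_eq_filter]
          refine List.filter_congr ?_
          intro x _
          have : (x ∈ U.filter (gaHit n Aset ((pvFl n Aset U halo)[((gbBest ((pvCM n Aset U (pvFl n Aset U halo)).map (fun e => gaGain e.2 rem))).1).toNat]'hiF)))
              ↔ (x ∈ (PySem.Set.ofList U).filter (gaHit n Aset ((pvFl n Aset U halo)[((gbBest ((pvCM n Aset U (pvFl n Aset U halo)).map (fun e => gaGain e.2 rem))).1).toNat]'hiF))) := by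
            rw [List.mem_filter, List.mem_filter, PySem.Set.mem_ofList]
          rw [Bool.eq_iff_iff]
          simp only [Bool.not_eq_true', List.contains_eq_mem, decide_eq_false_iff_not]
          exact not_congr this
        rw [pv_cover_spec n Aset U halo kmap hkm _ rem hsub]
        simp only []
        rw [← hrm]
        have hsub' : ∀ x ∈ gaRemove rem (U.filter (gaHit n Aset ((pvFl n Aset U halo)[((gbBest ((pvCM n Aset U (pvFl n Aset U halo)).map (fun e => gaGain e.2 rem))).1).toNat]'hiF))), x ∈ U := by
          intro x hx
          rw [pv_remove_eq_filter] at hx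
          exact hsub x (List.mem_of_mem_filter hx)
        by_cases hma : max_add.isSome = true ∧ picks + 1 ≥ max_add.getD 0
        · rw [if_pos hma, if_pos hma]
        · rw [if_neg hma, if_neg hma]
          exact ih _ _ _ hsub'

lemma pv_build_fst (n : Int) (Aset : PySem.Set Int) (U halo : List Int) :
    (gbBuild n Aset (PySem.Dict.counter U) halo).1 = pvCS n Aset U (pvFl n Aset U halo) := by
  unfold gbBuild
  rw [pv_build_fst_gen, PySem.Dict.keys_counter]
  rfl

lemma pv_build_gains (n : Int) (Aset : PySem.Set Int) (U halo : List Int) :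
    (gbBuild n Aset (PySem.Dict.counter U) halo).2.1
      = (pvCM n Aset U (pvFl n Aset U halo)).map (fun e => gaGain e.2 (PySem.Set.ofList U)) := by
  unfold gbBuild
  rw [pv_build_gains_gen, PySem.Dict.keys_counter]
  simp only [List.nil_append]
  unfold pvCM pvFl
  rw [List.map_map]
  refine List.map_congr_left ?_
  intro a _
  have h1 : gaGain (U.filter (gaHit n Aset a)) (PySem.Set.ofList U)
      = ((U.filter (gaHit n Aset a)).length : Int) := by
    refine pv_gain_full _ _ ?_
    intro x hx
    exact (PySem.Set.contains_iff _ _).2 ((PySem.Set.mem_ofList _ _).2 (List.mem_of_mem_filter hx))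
  have h2 : ((PySem.Set.ofList U).filter (fun k => gaHit n Aset a k)).map
        (fun k => (PySem.Dict.counter U).getD k 0)
      = ((PySem.Set.ofList U).filter (fun k => gaHit n Aset a k)).map (fun k => (U.count k : Int)) := by
    refine List.map_congr_left ?_
    intro k _
    exact PySem.Dict.getD_counter U k
  have h3 := pv_sum_counts (gaHit n Aset a) ((PySem.Set.ofList U).filter (fun k => gaHit n Aset a k)) U
    ((PySem.Set.nodup_ofList U).filter _)
    (fun k hk => List.of_mem_filter hk)
    (fun k hk hq => List.mem_filter.2 ⟨(PySem.Set.mem_ofList _ _).2 hk, hq⟩)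
  simp only [Function.comp]
  rw [h2, h3, h1]

lemma pv_build_kmap (n : Int) (Aset : PySem.Set Int) (U halo : List Int) :
    ∀ k, (gbBuild n Aset (PySem.Dict.counter U) halo).2.2.getD k []
      = (List.range (pvCS n Aset U (pvFl n Aset U halo)).length).filter
          (fun j => ((pvCS n Aset U (pvFl n Aset U halo)).getD j (0, [])).2.contains k) := by
  have h0 : ∀ k, (gbBuild n Aset (PySem.Dict.counter U) halo).2.2.getD k []
      = (List.range (gbBuild n Aset (PySem.Dict.counter U) halo).1.length).filter
          (fun j => ((gbBuild n Aset (PySem.Dict.counter U) halo).1.getD j (0, [])).2.contains k) := by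
    intro k
    unfold gbBuild
    refine pv_build_kmap_gen n Aset (PySem.Dict.counter U) (PySem.Dict.nodup_keys_counter U) halo
      ([], [], PySem.Dict.empty) ?_ k
    intro k'
    simp [PySem.Dict.getD_empty]
  intro k
  rw [h0 k, pv_build_fst]

-- ===== VERDICT (by name: the statement is the Claim_ definition above) =====
theorem greedy_augment_to_cover_spec : Claim_equal_greedy_augment_to_cover := by
  intro n A uncovered halo max_add start _
  unfold Spec_greedy_augment_to_cover greedy_augment_to_cover greedy_augment_to_cover_alt
  by_cases he : (uncovered.isEmpty || halo.isEmpty) = true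
  · rw [if_pos he, if_pos he]
  · rw [if_neg he, if_neg he]
    simp only []
    rw [PySem.Dict.foldl_insert_getD_add_one_eq_counter]
    rw [pv_build_fst, pv_build_gains, PySem.Dict.keys_counter]
    rw [pv_covermap_spec]
    have hflen : (pvCS n (PySem.Set.ofList A) uncovered (pvFl n (PySem.Set.ofList A) uncovered halo)).length
        = (pvCM n (PySem.Set.ofList A) uncovered (pvFl n (PySem.Set.ofList A) uncovered halo)).length := by
      simp [pvCM, pvCS]
    rw [hflen]
    rw [← pv_loop_eq n (PySem.Set.ofList A) uncovered halo _ max_add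
      (pv_build_kmap n (PySem.Set.ofList A) uncovered halo)
      ((pvCM n (PySem.Set.ofList A) uncovered (pvFl n (PySem.Set.ofList A) uncovered halo)).length + 1)
      (PySem.Set.ofList uncovered) [] 0
      (fun x hx => (PySem.Set.mem_ofList _ _).1 hx)]
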